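-- pv_equiv track=rewrite | github.com/Punkster81/divide-by | divide-by-min-spaces-with-div1.py | find_best_groups
-- ===== SOURCE A (Python) =====
-- def find_best_groups(target, products):
--     """
--     Find the best way to sum to target using products
--     Returns: (groups, total_spaces_for_numbers, has_any_overflow) or None
--     """
--     if target == 0:
--         return [], 0, False
--
--     if target < 0:
--         return None
--
--     # dp[i] = (groups, spaces_for_numbers, has_any_overflow)
--     dp = [None] * (target + 1)
--     dp[0] = ([], 0, False)
--
--     for i in range(1, target + 1):
--         best = None
--         best_spaces = float('inf')
--
--         for product, combo_list in products.items():
--             if product > i: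
--                 continue
--
--             prev = dp[i - product]
--             if prev is None:
--                 continue
--
--             prev_groups, prev_spaces, prev_overflow = prev
--
--             # Try each combo for this product
--             for combo, overflow_count in combo_list:
--                 new_spaces = prev_spaces + len(combo)
--
--                 if new_spaces < best_spaces:
--                     best_spaces = new_spaces
--                     best = (prev_groups + [(combo, overflow_count)], new_spaces, prev_overflow or overflow_count > 0)
--
--         dp[i] = best
--
--     if dp[target] is None:
--         return None
--
--     return dp[target]
-- ===== SOURCE B (Python) =====
-- def find_best_groups(target, products):
--     """
--     Find the best way to sum to target using products
--     Returns: (groups, total_spaces_for_numbers, has_any_overflow) or None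
--     """
--     if target == 0:
--         return [], 0, False
--
--     if target < 0:
--         return None
--
--     # One pass over products: only the FIRST minimal-length combo of a product
--     # can ever be selected, so keep just that one.
--     best_combos = []
--     for product, combo_list in products.items():
--         bc = None
--         for combo, overflow_count in combo_list:
--             if bc is None or len(combo) < len(bc[0]):
--                 bc = (combo, overflow_count)
--         if bc is not None:
--             best_combos.append((product, bc))
--
--     # dp[i] = (spaces, overflow, chain); chain is a cons-chain of (combo, ov),
--     # newest first; groups are rebuilt once at the end (no list copying per cell).
--     dp = [None] * (target + 1)
--     dp[0] = (0, False, None)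
--
--     for i in range(1, target + 1):
--         best = None
--         for product, (combo, overflow_count) in best_combos:
--             if product > i:
--                 continue
--             prev = dp[i - product]
--             if prev is None:
--                 continue
--             prev_spaces, prev_overflow, prev_chain = prev
--             new_spaces = prev_spaces + len(combo)
--             if best is None or new_spaces < best[0]:
--                 best = (new_spaces,
--                         prev_overflow or overflow_count > 0,
--                         ((combo, overflow_count), prev_chain))
--         dp[i] = best
--
--     if dp[target] is None:
--         return None
--     spaces, overflow, chain = dp[target]
--     groups = []
--     while chain is not None:
--         item, chain = chain
--         groups.append(item)
--     groups.reverse()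
--     return groups, spaces, overflow
-- ===== Notes on version B (the rewrite author's own statement) =====
-- stated objective: alternative
-- what changed: B precomputes the single first-minimal-length combo per product in one pass (the inner combo scan disappears from the DP loop) and stores per-cell a cons-chain of choices instead of copying the whole group list at every improvement, unwinding the chain once at the end.
import Mathlib
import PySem

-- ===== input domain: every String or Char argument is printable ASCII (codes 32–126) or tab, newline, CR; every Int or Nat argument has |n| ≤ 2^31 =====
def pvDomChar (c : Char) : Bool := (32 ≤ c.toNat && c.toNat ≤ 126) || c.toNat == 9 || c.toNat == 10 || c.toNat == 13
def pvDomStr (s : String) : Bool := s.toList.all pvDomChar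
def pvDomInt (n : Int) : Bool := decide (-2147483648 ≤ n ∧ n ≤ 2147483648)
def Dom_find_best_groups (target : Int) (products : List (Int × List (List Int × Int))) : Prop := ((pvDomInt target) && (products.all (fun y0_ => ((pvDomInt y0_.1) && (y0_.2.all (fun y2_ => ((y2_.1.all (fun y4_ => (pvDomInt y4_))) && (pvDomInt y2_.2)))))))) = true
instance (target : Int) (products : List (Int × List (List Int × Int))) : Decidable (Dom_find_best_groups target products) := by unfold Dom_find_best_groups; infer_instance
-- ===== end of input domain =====

-- B replaces A's re-scan of every combo of every product at every dp cell (and its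
-- per-cell group-list copying) by a single precomputed best combo per product and a
-- cons-chain of choices unwound once at the end; return value only, no mutation observable.

-- ===== PORT A =====
-- inner combo loop of A: accumulator is (best, best_spaces), best_spaces none = float('inf')
def pvAcombo (prev : (List (List Int × Int)) × Int × Bool)
    (acc : Option ((List (List Int × Int)) × Int × Bool) × Option Int)
    (ce : List Int × Int) :
    Option ((List (List Int × Int)) × Int × Bool) × Option Int :=
  let ns : Int := prev.2.1 + (ce.1.length : Int)
  if (match acc.2 with | none => true | some b => decide (ns < b)) then
    (some (prev.1 ++ [(ce.1, ce.2)], ns, prev.2.2 || decide (ce.2 > 0)), some ns)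
  else acc

-- body of A's 'for product, combo_list in products.items()'
def pvAprod (dp : List (Option ((List (List Int × Int)) × Int × Bool))) (i : Int)
    (acc : Option ((List (List Int × Int)) × Int × Bool) × Option Int)
    (pc : Int × List (List Int × Int)) :
    Option ((List (List Int × Int)) × Int × Bool) × Option Int :=
  if pc.1 > i then acc
  else
    match PySem.List.pyGetD dp (i - pc.1) none with
    | none => acc
    | some prev => pc.2.foldl (pvAcombo prev) acc

-- body of A's 'for i in range(1, target + 1)'
def pvAloop (products : List (Int × List (List Int × Int)))
    (dp : List (Option ((List (List Int × Int)) × Int × Bool))) (i : Int) :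
    List (Option ((List (List Int × Int)) × Int × Bool)) :=
  PySem.List.pySetD dp i (products.foldl (pvAprod dp i) (none, none)).1

def find_best_groups (target : Int) (products : List (Int × List (List Int × Int))) :
    Option ((List (List Int × Int)) × Int × Bool) :=
  if target = 0 then some ([], 0, false)
  else if target < 0 then none
  else
    let dp0 := PySem.List.pySetD
      (List.replicate (target + 1).toNat (none : Option ((List (List Int × Int)) × Int × Bool)))
      0 (some ([], 0, false))
    let dpF := (PySem.List.pyRange 1 (target + 1) 1).foldl (pvAloop products) dp0
    PySem.List.pyGetD dpF target none

-- ===== PORT B =====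
-- B's 'bc' scan: first combo of minimal length in a combo list
def pvBmin (cs : List (List Int × Int)) : Option (List Int × Int) :=
  cs.foldl (fun bc ce =>
    match bc with
    | none => some ce
    | some b => if ce.1.length < b.1.length then some ce else bc) none

-- B's best_combos list, built by appending
def pvBcombos (products : List (Int × List (List Int × Int))) : List (Int × (List Int × Int)) :=
  products.foldl (fun acc pc =>
    match pvBmin pc.2 with
    | none => acc
    | some b => acc ++ [(pc.1, b)]) []

-- body of B's 'for product, (combo, overflow_count) in best_combos'; dp cell = (spaces, overflow, chain)
def pvBprod (dp : List (Option (Int × Bool × List (List Int × Int)))) (i : Int)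
    (best : Option (Int × Bool × List (List Int × Int)))
    (pb : Int × (List Int × Int)) : Option (Int × Bool × List (List Int × Int)) :=
  if pb.1 > i then best
  else
    match PySem.List.pyGetD dp (i - pb.1) none with
    | none => best
    | some prev =>
      let ns : Int := prev.1 + (pb.2.1.length : Int)
      if (match best with | none => true | some b => decide (ns < b.1)) then
        some (ns, prev.2.1 || decide (pb.2.2 > 0), (pb.2.1, pb.2.2) :: prev.2.2)
      else best

def pvBloop (bcs : List (Int × (List Int × Int)))
    (dp : List (Option (Int × Bool × List (List Int × Int)))) (i : Int) :
    List (Option (Int × Bool × List (List Int × Int))) :=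
  PySem.List.pySetD dp i (bcs.foldl (pvBprod dp i) none)

def find_best_groups_alt (target : Int) (products : List (Int × List (List Int × Int))) :
    Option ((List (List Int × Int)) × Int × Bool) :=
  if target = 0 then some ([], 0, false)
  else if target < 0 then none
  else
    let bcs := pvBcombos products
    let dp0 := PySem.List.pySetD
      (List.replicate (target + 1).toNat (none : Option (Int × Bool × List (List Int × Int))))
      0 (some (0, false, []))
    let dpF := (PySem.List.pyRange 1 (target + 1) 1).foldl (pvBloop bcs) dp0
    match PySem.List.pyGetD dpF target none with
    | none => none
    | some st => some ((st.2.2.foldl (fun acc x => acc ++ [x]) []).reverse, st.1, st.2.1)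

-- ===== PRECONDITION & SPEC =====
-- Pre_ excludes exactly the inputs where Python A raises IndexError: a positive target
-- together with a negative product key makes A read dp[i - product] past the end of dp.
def Pre_find_best_groups (target : Int) (products : List (Int × List (List Int × Int))) : Prop :=
  target ≤ 0 ∨ ∀ pc ∈ products, 0 ≤ pc.1
instance (target : Int) (products : List (Int × List (List Int × Int))) : Decidable (Pre_find_best_groups target products) := by unfold Pre_find_best_groups; infer_instance

def pvWitness_find_best_groups : Int × (List (Int × List (List Int × Int))) :=
  (3, [(1, [([2, 3], 0)]), (2, [([5], 1), ([7], 0)])])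

def Spec_find_best_groups (target : Int) (products : List (Int × List (List Int × Int))) (out : Option ((List (List Int × Int)) × Int × Bool)) : Prop := out = find_best_groups_alt target products
instance (target : Int) (products : List (Int × List (List Int × Int))) (out : Option ((List (List Int × Int)) × Int × Bool)) : Decidable (Spec_find_best_groups target products out) := by unfold Spec_find_best_groups; infer_instance

-- ===== CLAIM (what is proved, stated in full; the proofs are below) =====
def Claim_equal_find_best_groups : Prop := ∀ (target : Int) (products : List (Int × List (List Int × Int))), Dom_find_best_groups target products → Pre_find_best_groups target products → Spec_find_best_groups target products (find_best_groups target products)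

-- ===== LEMMAS AND PROOFS =====

-- groups of an A-cell from the chain of a B-cell
def pvPhi (st : Int × Bool × List (List Int × Int)) : (List (List Int × Int)) × Int × Bool :=
  (st.2.2.reverse, st.1, st.2.1)

-- A's (best, best_spaces) pair corresponding to B's best
def pvMk (bb : Option (Int × Bool × List (List Int × Int))) :
    Option ((List (List Int × Int)) × Int × Bool) × Option Int :=
  (bb.map pvPhi, bb.map (·.1))

-- strict-min scan totalized
def pvMin1 (x : List Int × Int) (rest : List (List Int × Int)) : List Int × Int :=
  rest.foldl (fun b ce => if ce.1.length < b.1.length then ce else b) x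

theorem pvBmin_cons (x : List Int × Int) (rest : List (List Int × Int)) :
    pvBmin (x :: rest) = some (pvMin1 x rest) := by
  show List.foldl _ (some x) rest = _
  unfold pvMin1
  induction rest generalizing x with
  | nil => rfl
  | cons ce rest ih =>
    simp only [List.foldl]
    by_cases h : ce.1.length < x.1.length <;> simp [h, ih]

theorem pvAcombo_two (prevA : (List (List Int × Int)) × Int × Bool)
    (acc : Option ((List (List Int × Int)) × Int × Bool) × Option Int)
    (x ce : List Int × Int) :
    pvAcombo prevA (pvAcombo prevA acc x) ce
      = pvAcombo prevA acc (if ce.1.length < x.1.length then ce else x) := by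
  rcases acc with ⟨a1, a2⟩
  unfold pvAcombo
  rcases a2 with _ | b <;>
    by_cases h : ce.1.length < x.1.length <;>
    simp only [if_pos, h, decide_eq_true_eq] <;>
    split_ifs <;> simp_all <;> omega

theorem pvAcombo_fold (rest : List (List Int × Int))
    (prevA : (List (List Int × Int)) × Int × Bool)
    (acc : Option ((List (List Int × Int)) × Int × Bool) × Option Int)
    (x : List Int × Int) :
    List.foldl (pvAcombo prevA) (pvAcombo prevA acc x) rest
      = pvAcombo prevA acc (pvMin1 x rest) := by
  induction rest generalizing x with
  | nil => rfl
  | cons ce rest ih =>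
    simp only [List.foldl, pvAcombo_two]
    rw [ih]
    rfl

theorem pvBcombos_eq (ps : List (Int × List (List Int × Int))) :
    pvBcombos ps = ps.filterMap (fun pc => (pvBmin pc.2).map (fun b => (pc.1, b))) := by
  unfold pvBcombos
  suffices h : ∀ acc, List.foldl _ acc ps = acc ++ ps.filterMap (fun pc => (pvBmin pc.2).map (fun b => (pc.1, b))) by
    simpa using h []
  induction ps with
  | nil => simp
  | cons pc rest ih =>
    intro acc
    simp only [List.foldl, List.filterMap]
    cases pvBmin pc.2 <;> simp [ih]

-- one A product step equals one B product step through pvMk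
theorem pvStep_eq (dpB : List (Option (Int × Bool × List (List Int × Int)))) (i : Int)
    (bb : Option (Int × Bool × List (List Int × Int)))
    (pc : Int × List (List Int × Int)) :
    pvAprod (dpB.map (Option.map pvPhi)) i (pvMk bb) pc
      = pvMk ((match pvBmin pc.2 with
               | none => [] | some b => [(pc.1, b)]).foldl (pvBprod dpB i) bb) := by
  obtain ⟨p, cl⟩ := pc
  cases cl with
  | nil =>
    show pvAprod _ i (pvMk bb) (p, []) = _
    unfold pvAprod
    split
    · rfl
    · cases PySem.List.pyGetD (dpB.map (Option.map pvPhi)) (i - p) none <;> rfl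
  | cons x cs =>
    rw [pvBmin_cons]
    unfold pvAprod pvBprod
    simp only [List.foldl_cons, List.foldl_nil]
    split
    · rfl
    have hget : PySem.List.pyGetD (dpB.map (Option.map pvPhi)) (i - p) none
        = Option.map pvPhi (PySem.List.pyGetD dpB (i - p) none) := by
      rw [show (none : Option ((List (List Int × Int)) × Int × Bool))
        = Option.map pvPhi none from rfl, PySem.List.pyGetD_map]
    rw [hget]
    cases hprev : PySem.List.pyGetD dpB (i - p) none with
    | none => rfl
    | some prev =>
      simp only [Option.map_some]
      rw [pvAcombo_fold]
      -- final single-update equality through pvMk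
      rcases bb with _ | b <;>
        · unfold pvAcombo pvMk pvPhi
          simp only [Option.map_some, Option.map_none]
          split_ifs <;> simp_all

theorem pvProd_fold (ps : List (Int × List (List Int × Int)))
    (dpB : List (Option (Int × Bool × List (List Int × Int)))) (i : Int)
    (bb : Option (Int × Bool × List (List Int × Int))) :
    ps.foldl (pvAprod (dpB.map (Option.map pvPhi)) i) (pvMk bb)
      = pvMk ((pvBcombos ps).foldl (pvBprod dpB i) bb) := by
  induction ps generalizing bb with
  | nil => rfl
  | cons pc rest ih =>
    have hsplit : pvBcombos (pc :: rest)
        = (match pvBmin pc.2 with | none => [] | some b => [(pc.1, b)]) ++ pvBcombos rest := by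
      rw [pvBcombos_eq, pvBcombos_eq]
      cases h : pvBmin pc.2 <;> simp [List.filterMap, h]
    rw [hsplit, List.foldl_append, List.foldl_cons, pvStep_eq, ih]

theorem pvLoop_fold (products : List (Int × List (List Int × Int))) (l : List Int)
    (hl : ∀ i ∈ l, 0 ≤ i)
    (dpB : List (Option (Int × Bool × List (List Int × Int)))) :
    l.foldl (pvAloop products) (dpB.map (Option.map pvPhi))
      = (l.foldl (pvBloop (pvBcombos products)) dpB).map (Option.map pvPhi) := by
  induction l generalizing dpB with
  | nil => rfl
  | cons i l ih =>
    have hi : 0 ≤ i := hl i (List.mem_cons_self ..)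
    simp only [List.foldl]
    have hbody : pvAloop products (dpB.map (Option.map pvPhi)) i
        = (pvBloop (pvBcombos products) dpB i).map (Option.map pvPhi) := by
      unfold pvAloop pvBloop
      have h := pvProd_fold products dpB i none
      simp only [pvMk, Option.map_none] at h
      rw [h, PySem.List.pySetD_of_nonneg _ _ hi, PySem.List.pySetD_of_nonneg _ _ hi,
        List.map_set]
    rw [hbody, ih (fun j hj => hl j (List.mem_cons_of_mem _ hj))]

-- ===== VERDICT (by name: the statement is the Claim_ definition above) =====
theorem find_best_groups_spec : Claim_equal_find_best_groups := by
  intro target products _ _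
  unfold Spec_find_best_groups find_best_groups find_best_groups_alt
  by_cases h0 : target = 0
  · simp [h0]
  by_cases hn : target < 0
  · simp [h0, hn]
  simp only [h0, hn, if_false]
  have hdp0 : PySem.List.pySetD
      (List.replicate (target + 1).toNat (none : Option ((List (List Int × Int)) × Int × Bool)))
      0 (some ([], 0, false))
      = (PySem.List.pySetD
          (List.replicate (target + 1).toNat (none : Option (Int × Bool × List (List Int × Int))))
          0 (some (0, false, []))).map (Option.map pvPhi) := by
    rw [PySem.List.pySetD_of_nonneg _ _ le_rfl, PySem.List.pySetD_of_nonneg _ _ le_rfl,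
      List.map_set, List.map_replicate]
    rfl
  rw [hdp0, pvLoop_fold products _ (fun i hi => by
    have := PySem.List.mem_pyRange_one.mp hi; omega)]
  rw [show (none : Option ((List (List Int × Int)) × Int × Bool))
      = Option.map pvPhi none from rfl, PySem.List.pyGetD_map]
  cases h : PySem.List.pyGetD _ target none with
  | none => rfl
  | some st =>
    simp only [Option.map_some, PySem.List.foldl_append_singleton_eq_self,
      List.nil_append, pvPhi]
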